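-- pv_equiv track=rewrite | github.com/3Ainvestimentos/ted_plan | scripts/migrate-topic-numbers.py | group_by_area_and_type
-- ===== SOURCE A (Python) =====
-- from collections import defaultdict
-- from typing import Dict, List, Tuple, Optional
--
-- def group_by_area_and_type(initiatives: List[Dict]) -> Dict[str, Dict]:
--     """
--     Agrupa iniciativas ativas por área e tipo.
--
--     Args:
--         initiatives: Lista de iniciativas
--
--     Returns:
--         Dicionário com grupos de iniciativas por área/tipo
--     """
--     groups = defaultdict(list)
--
--     for init in initiatives:
--         # Ignorar soft-deleted
--         if init.get('deletedAt'):
--             continue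
--
--         area_id = init.get('areaId', 'unknown')
--         init_type = init.get('initiativeType', 'strategic')
--         key = f"{area_id}::{init_type}"
--
--         groups[key].append(init)
--
--     return dict(groups)
-- ===== SOURCE B (Python) =====
-- def group_by_area_and_type(initiatives):
--     def key(init):
--         area_id = init.get('areaId', 'unknown')
--         init_type = init.get('initiativeType', 'strategic')
--         return f"{area_id}::{init_type}"
--
--     active = [init for init in initiatives if not init.get('deletedAt')]
--     keys = []
--     for init in active:
--         k = key(init)
--         if k not in keys:
--             keys.append(k)
--     return {k: [init for init in active if key(init) == k] for k in keys}
-- ===== Notes on version B (the rewrite author's own statement) =====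
-- stated objective: alternative
-- what changed: Replaces the single-pass defaultdict accumulator with a three-stage pipeline: filter out soft-deleted items, collect the distinct composite keys in first-appearance order, then build each group by an independent filter pass over the active list (no mutable dict accumulation).
import Mathlib
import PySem

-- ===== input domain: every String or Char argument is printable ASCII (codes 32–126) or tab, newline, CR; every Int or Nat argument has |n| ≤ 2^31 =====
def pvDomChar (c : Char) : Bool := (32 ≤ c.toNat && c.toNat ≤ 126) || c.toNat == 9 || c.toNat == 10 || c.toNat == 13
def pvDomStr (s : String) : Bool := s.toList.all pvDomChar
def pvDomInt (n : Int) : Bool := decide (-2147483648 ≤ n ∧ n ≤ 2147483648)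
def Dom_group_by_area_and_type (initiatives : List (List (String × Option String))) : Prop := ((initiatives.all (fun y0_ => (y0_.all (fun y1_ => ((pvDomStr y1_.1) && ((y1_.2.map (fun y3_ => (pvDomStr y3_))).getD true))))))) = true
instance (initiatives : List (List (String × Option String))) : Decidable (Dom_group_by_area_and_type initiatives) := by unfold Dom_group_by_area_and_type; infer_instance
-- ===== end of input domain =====

-- B replaces A's single-pass defaultdict accumulation by filter + ordered key dedup + one filter
-- pass per distinct key; equivalence of the returned association lists is proved below.

-- ===== PORT A =====
-- str(v) for a value v that is either a Python str or None (f-string interpolation)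
def pvStrOf : Option String → String
  | none => "None"
  | some s => s

-- init.get('deletedAt') is truthy (a non-empty string)
def pvDeleted (init : List (String × Option String)) : Bool :=
  match (PySem.Dict.mk init).get? "deletedAt" with
  | some (some s) => !(s == "")
  | _ => false

-- f"{init.get('areaId','unknown')}::{init.get('initiativeType','strategic')}"
def pvKeyOf (init : List (String × Option String)) : String :=
  pvStrOf ((PySem.Dict.mk init).getD "areaId" (some "unknown")) ++ "::" ++
    pvStrOf ((PySem.Dict.mk init).getD "initiativeType" (some "strategic"))

def group_by_area_and_type (initiatives : List (List (String × Option String))) : List (String × List (List (String × Option String))) :=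
  -- groups = defaultdict(list); for init in initiatives: skip deleted, groups[key].append(init)
  let groups := initiatives.foldl
    (fun d init =>
      if pvDeleted init then d
      else d.modify (pvKeyOf init) [] (fun l => l ++ [init]))
    PySem.Dict.empty
  -- return dict(groups)
  groups.items

-- ===== PORT B =====
def group_by_area_and_type_alt (initiatives : List (List (String × Option String))) : List (String × List (List (String × Option String))) :=
  -- active = [init for init in initiatives if not init.get('deletedAt')]
  let active := initiatives.filter (fun i => !pvDeleted i)
  -- keys = []; for init in active: if key(init) not in keys: keys.append(key(init))
  let keys := active.foldl (fun ks i => if ks.contains (pvKeyOf i) then ks else ks ++ [pvKeyOf i]) []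
  -- {k: [init for init in active if key(init) == k] for k in keys}
  keys.map (fun k => (k, active.filter (fun i => pvKeyOf i == k)))

-- ===== PRECONDITION & SPEC =====
def Spec_group_by_area_and_type (initiatives : List (List (String × Option String))) (out : List (String × List (List (String × Option String)))) : Prop := out = group_by_area_and_type_alt initiatives
instance (initiatives : List (List (String × Option String))) (out : List (String × List (List (String × Option String)))) : Decidable (Spec_group_by_area_and_type initiatives out) := by unfold Spec_group_by_area_and_type; infer_instance

-- ===== CLAIM (what is proved, stated in full; the proofs are below) =====
def Claim_equal_group_by_area_and_type : Prop := ∀ (initiatives : List (List (String × Option String))), Dom_group_by_area_and_type initiatives → Spec_group_by_area_and_type initiatives (group_by_area_and_type initiatives)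

-- ===== LEMMAS AND PROOFS =====

-- generic: a defaultdict(list) grouping loop's items = keys dedup'd in first-appearance order,
-- each paired with the filter of the list by that key
theorem dictGroup_items {κ β : Type} [BEq κ] [LawfulBEq κ] (l : List β) (k : β → κ) :
    (l.foldl (fun d i => d.modify (k i) [] (fun g => g ++ [i])) PySem.Dict.empty).items
    = (l.foldl (fun ks i => if ks.contains (k i) then ks else ks ++ [k i]) []).map
        (fun c => (c, l.filter (fun i => k i == c))) := by
  have hpair : l.foldl (fun d i => d.modify (k i) [] (fun g => g ++ [i])) PySem.Dict.empty
      = (l.map (fun i => (k i, i))).foldl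
          (fun d p => d.modify p.1 [] (fun g => g ++ [p.2])) PySem.Dict.empty := by
    rw [List.foldl_map]
  have hnd : (l.foldl (fun d i => d.modify (k i) [] (fun g => g ++ [i])) PySem.Dict.empty).keys.Nodup := by
    exact PySem.Dict.nodup_keys_foldl_modify_key l k [] (fun _ i g => g ++ [i]) _ (by simp)
  have hkeys : (l.foldl (fun d i => d.modify (k i) [] (fun g => g ++ [i])) PySem.Dict.empty).keys
      = PySem.Set.ofList (l.map k) := by
    have h := PySem.Dict.keys_foldl_modify_key l k [] (fun _ i g => g ++ [i]) PySem.Dict.empty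
    simpa [PySem.Set.update_nil_left] using h
  have hkeysB : l.foldl (fun ks i => if ks.contains (k i) then ks else ks ++ [k i]) []
      = PySem.Set.ofList (l.map k) := by
    rw [← PySem.Set.update_nil_left, PySem.Set.update_map_eq_foldl_add]
    apply PySem.List.foldl_congr_mem
    intro acc x _
    rfl
  rw [PySem.Dict.items_eq_map_keys _ hnd [], hkeys, hkeysB]
  apply List.map_congr_left
  intro c _
  congr 1
  rw [hpair, PySem.Dict.getD_foldl_modify_append]
  simp [List.filter_map, Function.comp_def, List.map_map]

-- A's loop skips deleted items: it is the grouping loop over the filtered list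
theorem gbat_filter (initiatives : List (List (String × Option String))) :
    initiatives.foldl
      (fun d init => if pvDeleted init then d
        else d.modify (pvKeyOf init) [] (fun l => l ++ [init])) PySem.Dict.empty
      = (initiatives.filter (fun i => !pvDeleted i)).foldl
          (fun d init => d.modify (pvKeyOf init) [] (fun l => l ++ [init])) PySem.Dict.empty := by
  rw [← PySem.List.foldl_if_eq_foldl_filter (p := fun i => !pvDeleted i)]
  apply PySem.List.foldl_congr_mem
  intro acc x _
  by_cases h : pvDeleted x <;> simp [h]

theorem gbat_main (initiatives : List (List (String × Option String))) :
    group_by_area_and_type initiatives = group_by_area_and_type_alt initiatives := by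
  exact (congrArg PySem.Dict.items (gbat_filter initiatives)).trans
    (dictGroup_items (initiatives.filter (fun i => !pvDeleted i)) pvKeyOf)

-- ===== VERDICT (by name: the statement is the Claim_ definition above) =====
theorem group_by_area_and_type_spec : Claim_equal_group_by_area_and_type := by
  intro initiatives _
  unfold Spec_group_by_area_and_type
  exact gbat_main initiatives
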